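-- pv_equiv track=rewrite | github.com/AiGentsy/aigentsy-ame-runtime | universal_integration_layer.py | _generate_worker_combinations
-- ===== SOURCE A (Python) =====
-- from typing import Dict, List, Any, Optional
--
-- def _generate_worker_combinations(workers: List[str]) -> List[List[str]]:
--     """Generate all possible worker combinations"""
--
--     combinations = []
--
--     # Single workers
--     for worker in workers:
--         combinations.append([worker])
--
--     # Pairs (if multiple workers)
--     if len(workers) > 1:
--         for i, worker1 in enumerate(workers):
--             for worker2 in workers[i+1:]:
--                 combinations.append([worker1, worker2])
--
--     # Triple combinations for complex projects
--     if len(workers) > 2: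
--         for i, worker1 in enumerate(workers):
--             for j, worker2 in enumerate(workers[i+1:], i+1):
--                 for worker3 in workers[j+1:]:
--                     combinations.append([worker1, worker2, worker3])
--
--     return combinations
-- ===== SOURCE B (Python) =====
-- from typing import List
--
-- def _generate_worker_combinations(workers: List[str]) -> List[List[str]]:
--     """Breadth-first frontier expansion: a worklist of (partial combo, next start
--     index) pairs is expanded three times; each level's combos are collected."""
--     result = []
--     frontier = [([], 0)]
--     for _ in range(3):
--         next_frontier = []
--         for combo, start in frontier:
--             for k in range(start, len(workers)):
--                 next_frontier.append((combo + [workers[k]], k + 1))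
--         frontier = next_frontier
--         result.extend(combo for combo, _ in frontier)
--     return result
-- ===== Notes on version B (the rewrite author's own statement) =====
-- stated objective: alternative
-- what changed: Replaces the three fixed-depth hand-written loop nests (with len>1/len>2 guards) by breadth-first frontier expansion: a worklist of (partial combo, remaining suffix) pairs is expanded three times and each level's combos are collected.
import Mathlib
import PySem

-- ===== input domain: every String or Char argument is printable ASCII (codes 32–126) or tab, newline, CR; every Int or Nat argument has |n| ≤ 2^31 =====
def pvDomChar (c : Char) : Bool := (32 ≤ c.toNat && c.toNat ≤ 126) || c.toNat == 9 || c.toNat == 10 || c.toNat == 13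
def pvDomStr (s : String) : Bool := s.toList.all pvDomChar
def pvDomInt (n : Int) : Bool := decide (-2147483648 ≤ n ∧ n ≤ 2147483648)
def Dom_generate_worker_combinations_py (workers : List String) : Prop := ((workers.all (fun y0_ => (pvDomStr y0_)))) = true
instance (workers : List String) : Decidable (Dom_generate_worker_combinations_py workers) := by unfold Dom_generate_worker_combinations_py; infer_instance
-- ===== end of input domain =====

-- B replaces A's three fixed-depth loop nests by breadth-first frontier expansion over (partial combo, remaining suffix) pairs (alternative decomposition, same cost).


-- ===== PORT A =====
def generate_worker_combinations_py (workers : List String) : List (List String) :=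
  -- combinations = []; single workers
  let combinations : List (List String) :=
    workers.foldl (fun acc worker => acc ++ [[worker]]) []
  -- pairs (if multiple workers)
  let combinations : List (List String) :=
    if workers.length > 1 then
      (PySem.List.enumerate workers 0).foldl (fun acc p =>
        (PySem.List.slice workers (some (p.1 + 1)) none).foldl
          (fun acc2 worker2 => acc2 ++ [[p.2, worker2]]) acc) combinations
    else combinations
  -- triple combinations for complex projects
  let combinations : List (List String) :=
    if workers.length > 2 then
      (PySem.List.enumerate workers 0).foldl (fun acc p =>
        (PySem.List.enumerate (PySem.List.slice workers (some (p.1 + 1)) none) (p.1 + 1)).foldl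
          (fun acc2 q =>
            (PySem.List.slice workers (some (q.1 + 1)) none).foldl
              (fun acc3 worker3 => acc3 ++ [[p.2, q.2, worker3]]) acc2) acc) combinations
    else combinations
  combinations

-- ===== PORT B =====
-- inner loop of B: for k in range(start, len(workers)): next_frontier.append((combo + [workers[k]], k + 1))
-- workers[k] always has start ≤ k < len(workers), so pyGetD's default is never used (exact here)
def pvExpand (ws : List String) (p : List String × Int) : List (List String × Int) :=
  (PySem.List.pyRange p.2 (ws.length : Int) 1).foldl
    (fun acc k => acc ++ [(p.1 ++ [PySem.List.pyGetD ws k ""], k + 1)]) []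

def generate_worker_combinations_py_alt (workers : List String) : List (List String) :=
  -- result = []; frontier = [([], 0)]
  -- for _ in range(3): next_frontier = [...expand each frontier pair...];
  --   frontier = next_frontier; result.extend(combo for combo, _ in frontier)
  ((PySem.List.pyRange 0 3 1).foldl
    (fun st _ =>
      let next := st.2.foldl (fun acc p => acc ++ pvExpand workers p) []
      (st.1 ++ next.map Prod.fst, next))
    (([] : List (List String)), [(([] : List String), (0 : Int))])).1

-- ===== PRECONDITION & SPEC =====
def Spec_generate_worker_combinations_py (workers : List String) (out : List (List String)) : Prop := out = generate_worker_combinations_py_alt workers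
instance (workers : List String) (out : List (List String)) : Decidable (Spec_generate_worker_combinations_py workers out) := by unfold Spec_generate_worker_combinations_py; infer_instance

-- ===== CLAIM (what is proved, stated in full; the proofs are below) =====
def Claim_equal_generate_worker_combinations_py : Prop := ∀ (workers : List String), Dom_generate_worker_combinations_py workers → Spec_generate_worker_combinations_py workers (generate_worker_combinations_py workers)

-- ===== LEMMAS AND PROOFS =====

-- The common yardstick both ports are measured against: combinations in index order.
def pyCombinations : Nat → List String → List (List String)
  | 0, _ => [[]]
  | _ + 1, [] => []
  | r + 1, x :: xs => (pyCombinations r xs).map (fun c => x :: c) ++ pyCombinations (r + 1) xs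

theorem comb_one (xs : List String) : pyCombinations 1 xs = xs.map (fun w => [w]) := by
  induction xs with
  | nil => rfl
  | cons x xs ih => simp [pyCombinations, ih]

theorem comb_nil_of_lt : ∀ (xs : List String) (r : Nat), xs.length < r → pyCombinations r xs = [] := by
  intro xs
  induction xs with
  | nil =>
    intro r h
    cases r with
    | zero => omega
    | succ r => rfl
  | cons x xs ih =>
    intro r h
    cases r with
    | zero => omega
    | succ r =>
      simp at h
      rw [pyCombinations, ih r (by omega), ih (r + 1) (by omega)]
      simp

-- ===== A-side characterisation =====

theorem pairs_fold (ws : List String) :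
    ∀ (xs : List String) (s : Nat) (init : List (List String)), ws.drop s = xs →
      (PySem.List.enumerate xs (s : Int)).foldl (fun acc p =>
        (PySem.List.slice ws (some (p.1 + 1)) none).foldl
          (fun acc2 w2 => acc2 ++ [[p.2, w2]]) acc) init
      = init ++ pyCombinations 2 xs := by
  intro xs
  induction xs with
  | nil => intro s init h; simp [PySem.List.enumerate_nil, pyCombinations]
  | cons x xs ih =>
    intro s init h
    have hdrop : ws.drop (s + 1) = xs := by
      rw [← List.drop_drop, h]; simp
    rw [PySem.List.enumerate_cons]
    simp only [List.foldl]
    have hc : ((s : Int) + 1) = ((s + 1 : Nat) : Int) := by push_cast; ring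
    rw [hc, PySem.List.slice_from_natCast, hdrop,
        PySem.List.foldl_append_singleton_eq_map,
        ih (s + 1) _ hdrop]
    simp [pyCombinations, comb_one, List.map_map, Function.comp]

theorem mid_fold (ws : List String) (x : String) :
    ∀ (xs : List String) (s : Nat) (init : List (List String)), ws.drop s = xs →
      (PySem.List.enumerate xs (s : Int)).foldl (fun acc2 q =>
        (PySem.List.slice ws (some (q.1 + 1)) none).foldl
          (fun acc3 w3 => acc3 ++ [[x, q.2, w3]]) acc2) init
      = init ++ (pyCombinations 2 xs).map (fun c => x :: c) := by
  intro xs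
  induction xs with
  | nil => intro s init h; simp [PySem.List.enumerate_nil, pyCombinations]
  | cons y xs ih =>
    intro s init h
    have hdrop : ws.drop (s + 1) = xs := by
      rw [← List.drop_drop, h]; simp
    rw [PySem.List.enumerate_cons]
    simp only [List.foldl]
    have hc : ((s : Int) + 1) = ((s + 1 : Nat) : Int) := by push_cast; ring
    rw [hc, PySem.List.slice_from_natCast, hdrop,
        PySem.List.foldl_append_singleton_eq_map,
        ih (s + 1) _ hdrop]
    simp [pyCombinations, comb_one, List.map_map, Function.comp]

theorem triples_fold (ws : List String) :
    ∀ (xs : List String) (s : Nat) (init : List (List String)), ws.drop s = xs →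
      (PySem.List.enumerate xs (s : Int)).foldl (fun acc p =>
        (PySem.List.enumerate (PySem.List.slice ws (some (p.1 + 1)) none) (p.1 + 1)).foldl
          (fun acc2 q =>
            (PySem.List.slice ws (some (q.1 + 1)) none).foldl
              (fun acc3 w3 => acc3 ++ [[p.2, q.2, w3]]) acc2) acc) init
      = init ++ pyCombinations 3 xs := by
  intro xs
  induction xs with
  | nil => intro s init h; simp [PySem.List.enumerate_nil, pyCombinations]
  | cons x xs ih =>
    intro s init h
    have hdrop : ws.drop (s + 1) = xs := by
      rw [← List.drop_drop, h]; simp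
    rw [PySem.List.enumerate_cons]
    simp only [List.foldl]
    have hc : ((s : Int) + 1) = ((s + 1 : Nat) : Int) := by push_cast; ring
    rw [hc, PySem.List.slice_from_natCast, hdrop,
        mid_fold ws x xs (s + 1) init hdrop,
        ih (s + 1) _ hdrop]
    simp [pyCombinations]

theorem a_eq (ws : List String) :
    generate_worker_combinations_py ws
      = pyCombinations 1 ws ++ pyCombinations 2 ws ++ pyCombinations 3 ws := by
  unfold generate_worker_combinations_py
  simp only []
  rw [PySem.List.foldl_append_singleton_eq_map, ← comb_one]
  simp only [List.nil_append]
  have e2 := pairs_fold ws ws 0 (pyCombinations 1 ws) (by simp)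
  rw [Nat.cast_zero] at e2
  have e3 := triples_fold ws ws 0 (pyCombinations 1 ws ++ pyCombinations 2 ws) (by simp)
  rw [Nat.cast_zero] at e3
  by_cases h1 : ws.length > 1
  · rw [if_pos h1, e2]
    by_cases h2 : ws.length > 2
    · rw [if_pos h2, e3]
    · rw [if_neg h2, comb_nil_of_lt ws 3 (by omega)]
      simp
  · rw [if_neg h1, if_neg (by omega : ¬ ws.length > 2),
        comb_nil_of_lt ws 2 (by omega), comb_nil_of_lt ws 3 (by omega)]
    simp

-- ===== B-side characterisation =====

-- structural form of pvExpand on the suffix ws.drop s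
def expandSpec (c : List String) : List String → Nat → List (List String × Int)
  | [], _ => []
  | x :: xs, s => (c ++ [x], (s : Int) + 1) :: expandSpec c xs (s + 1)

-- all completions of a frontier pair by r more elements, combos in index order
def gComb (ws : List String) (r : Nat) (p : List String × Int) : List (List String) :=
  (pyCombinations r (ws.drop p.2.toNat)).map (fun d => p.1 ++ d)

theorem pvExpand_map (ws : List String) (p : List String × Int) :
    pvExpand ws p = (PySem.List.pyRange p.2 (ws.length : Int) 1).map
      (fun k => (p.1 ++ [PySem.List.pyGetD ws k ""], k + 1)) := by
  unfold pvExpand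
  rw [PySem.List.foldl_append_singleton_eq_map]
  simp

theorem pvExpand_eq (ws c : List String) :
    ∀ (xs : List String) (s : Nat), ws.drop s = xs →
      pvExpand ws (c, (s : Int)) = expandSpec c xs s := by
  intro xs
  induction xs with
  | nil =>
    intro s h
    rw [pvExpand_map]
    simp only []
    have hle : ws.length ≤ s := List.drop_eq_nil_iff.mp h
    rw [PySem.List.pyRange_one_eq_nil (by exact_mod_cast hle)]
    rfl
  | cons x xs ih =>
    intro s h
    have hlt : s < ws.length := by
      by_contra hc
      rw [List.drop_eq_nil_of_le (by omega)] at h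
      simp at h
    have hdrop : ws.drop (s + 1) = xs := by
      rw [← List.drop_drop, h]; simp
    rw [pvExpand_map]
    simp only []
    rw [PySem.List.pyRange_one_cons (by exact_mod_cast hlt)]
    have hx : PySem.List.pyGetD ws (s : Int) "" = x := by
      rw [PySem.List.pyGetD_natCast]
      have : ws[s]? = some x := by rw [← List.head?_drop, h]; rfl
      simp [List.getD, this]
    rw [List.map_cons]
    have hc1 : ((s : Int) + 1) = ((s + 1 : Nat) : Int) := by push_cast; ring
    rw [hx, expandSpec]
    congr 1
    have hrec := ih (s + 1) hdrop
    rw [pvExpand_map] at hrec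
    simp only [] at hrec
    rw [hc1]
    exact hrec

theorem expandSpec_flatMap (ws c : List String) (r : Nat) :
    ∀ (xs : List String) (s : Nat), ws.drop s = xs →
      (expandSpec c xs s).flatMap (gComb ws r)
        = (pyCombinations (r + 1) xs).map (fun d => c ++ d) := by
  intro xs
  induction xs with
  | nil => intro s h; simp [expandSpec, pyCombinations]
  | cons x xs ih =>
    intro s h
    have hdrop : ws.drop (s + 1) = xs := by
      rw [← List.drop_drop, h]; simp
    rw [expandSpec, List.flatMap_cons, ih (s + 1) hdrop]
    have ht : ((s : Int) + 1).toNat = s + 1 := by omega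
    simp only [gComb, ht, hdrop]
    simp [pyCombinations, List.map_map, Function.comp]

theorem pair_flatMap (ws : List String) (r : Nat) (p : List String × Int) (hp : 0 ≤ p.2) :
    (pvExpand ws p).flatMap (gComb ws r) = gComb ws (r + 1) p := by
  obtain ⟨c, s⟩ := p
  simp only [] at hp
  have hs : ((s.toNat : Nat) : Int) = s := Int.toNat_of_nonneg hp
  have h1 : pvExpand ws (c, s) = expandSpec c (ws.drop s.toNat) s.toNat := by
    rw [← hs]; exact pvExpand_eq ws c _ s.toNat rfl
  rw [h1, expandSpec_flatMap ws c r _ s.toNat rfl]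
  simp only [gComb]

theorem flatMap_congr_mem {α β : Type} (f g : α → List β) :
    ∀ (l : List α), (∀ a ∈ l, f a = g a) → l.flatMap f = l.flatMap g := by
  intro l
  induction l with
  | nil => intro _; rfl
  | cons a l ih =>
    intro h
    rw [List.flatMap_cons, List.flatMap_cons, h a (by simp), ih (fun b hb => h b (by simp [hb]))]

theorem mem_expand_nonneg (ws : List String) (p : List String × Int) (hp : 0 ≤ p.2) :
    ∀ q ∈ pvExpand ws p, 0 ≤ q.2 := by
  intro q hq
  rw [pvExpand_map] at hq
  obtain ⟨k, hk, rfl⟩ := List.mem_map.mp hq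
  have := (PySem.List.mem_pyRange_one).mp hk
  simp only []
  omega

theorem step_flatMap (ws : List String) (F : List (List String × Int)) (r : Nat)
    (hF : ∀ p ∈ F, 0 ≤ p.2) :
    (F.foldl (fun acc p => acc ++ pvExpand ws p) []).flatMap (gComb ws r)
      = F.flatMap (gComb ws (r + 1)) := by
  rw [PySem.List.foldl_append_eq_flatMap]
  simp only [List.nil_append, List.flatMap_assoc]
  exact flatMap_congr_mem _ _ F (fun p hp => pair_flatMap ws r p (hF p hp))

theorem step_nonneg (ws : List String) (F : List (List String × Int))
    (hF : ∀ p ∈ F, 0 ≤ p.2) :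
    ∀ q ∈ F.foldl (fun acc p => acc ++ pvExpand ws p) [], 0 ≤ q.2 := by
  intro q hq
  rw [PySem.List.foldl_append_eq_flatMap] at hq
  simp only [List.nil_append] at hq
  obtain ⟨p, hp, hq⟩ := List.mem_flatMap.mp hq
  exact mem_expand_nonneg ws p (hF p hp) q hq

theorem map_fst_eq_flatMap_g0 (ws : List String) (F : List (List String × Int)) :
    F.map Prod.fst = F.flatMap (gComb ws 0) := by
  induction F with
  | nil => rfl
  | cons p F ih => simp [gComb, pyCombinations, ih]

theorem alt_eq (ws : List String) :
    generate_worker_combinations_py_alt ws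
      = pyCombinations 1 ws ++ pyCombinations 2 ws ++ pyCombinations 3 ws := by
  unfold generate_worker_combinations_py_alt
  have h03 : PySem.List.pyRange 0 3 1 = [0, 1, 2] := by decide
  rw [h03]
  simp only [List.foldl]
  have r1 : (([] : List (List String × Int)) ++ pvExpand ws ([], 0))
      = List.foldl (fun acc p => acc ++ pvExpand ws p) [] [(([] : List String), (0 : Int))] := rfl
  rw [r1]
  set F0 : List (List String × Int) := [([], 0)] with hF0
  set N1 := F0.foldl (fun acc p => acc ++ pvExpand ws p) [] with hN1
  set N2 := N1.foldl (fun acc p => acc ++ pvExpand ws p) [] with hN2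
  set N3 := N2.foldl (fun acc p => acc ++ pvExpand ws p) [] with hN3
  have i0 : ∀ p ∈ F0, (0 : Int) ≤ p.2 := by intro p hp; simp [hF0] at hp; simp [hp]
  have i1 : ∀ p ∈ N1, (0 : Int) ≤ p.2 := by rw [hN1]; exact step_nonneg ws F0 i0
  have i2 : ∀ p ∈ N2, (0 : Int) ≤ p.2 := by rw [hN2]; exact step_nonneg ws N1 i1
  have g0 : ∀ r, F0.flatMap (gComb ws r) = pyCombinations r ws := by
    intro r; simp [hF0, gComb]
  have m1 : N1.map Prod.fst = pyCombinations 1 ws := by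
    rw [map_fst_eq_flatMap_g0 ws, hN1, step_flatMap ws F0 0 i0, g0]
  have m2 : N2.map Prod.fst = pyCombinations 2 ws := by
    rw [map_fst_eq_flatMap_g0 ws, hN2, step_flatMap ws N1 0 i1, hN1,
        step_flatMap ws F0 1 i0, g0]
  have m3 : N3.map Prod.fst = pyCombinations 3 ws := by
    rw [map_fst_eq_flatMap_g0 ws, hN3, step_flatMap ws N2 0 i2, hN2,
        step_flatMap ws N1 1 i1, hN1, step_flatMap ws F0 2 i0, g0]
  rw [m1, m2, m3]
  simp

-- ===== VERDICT (by name: the statement is the Claim_ definition above) =====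
theorem generate_worker_combinations_py_spec : Claim_equal_generate_worker_combinations_py := by
  intro ws _
  unfold Spec_generate_worker_combinations_py
  rw [a_eq, alt_eq]
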